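-- pv_equiv track=rewrite | github.com/867888660/linkO | 补丁包安装/files/Nodes/txttrriger_new.py | group_events
-- ===== SOURCE A (Python) =====
-- def group_events(events, max_array_num):
--     """
--     根据max_array_num对events进行分组
--     例如: events长度为7, max_array_num=3, 则分成[0,1,2], [3,4,5], [6]三组
--     """
--     if not max_array_num or max_array_num <= 1:
--         return events
--
--     grouped_events = []
--     for i in range(0, len(events), max_array_num):
--         group = events[i:i+max_array_num]
--         if len(group) > 0:
--             grouped_events.append('\n'.join(group))
--
--     return grouped_events
-- ===== SOURCE B (Python) =====
-- def group_events(events, max_array_num):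
--     if not max_array_num or max_array_num <= 1:
--         return events
--     result = []
--     cur = []
--     for e in events:
--         cur.append(e)
--         if len(cur) == max_array_num:
--             result.append('\n'.join(cur))
--             cur = []
--     if cur:
--         result.append('\n'.join(cur))
--     return result
-- ===== Notes on version B (the rewrite author's own statement) =====
-- stated objective: alternative
-- what changed: Replaced A's stride-indexed range loop with repeated slicing by a single element-wise pass that maintains a running buffer flushed whenever it reaches max_array_num (plus a trailing flush).
import Mathlib
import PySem

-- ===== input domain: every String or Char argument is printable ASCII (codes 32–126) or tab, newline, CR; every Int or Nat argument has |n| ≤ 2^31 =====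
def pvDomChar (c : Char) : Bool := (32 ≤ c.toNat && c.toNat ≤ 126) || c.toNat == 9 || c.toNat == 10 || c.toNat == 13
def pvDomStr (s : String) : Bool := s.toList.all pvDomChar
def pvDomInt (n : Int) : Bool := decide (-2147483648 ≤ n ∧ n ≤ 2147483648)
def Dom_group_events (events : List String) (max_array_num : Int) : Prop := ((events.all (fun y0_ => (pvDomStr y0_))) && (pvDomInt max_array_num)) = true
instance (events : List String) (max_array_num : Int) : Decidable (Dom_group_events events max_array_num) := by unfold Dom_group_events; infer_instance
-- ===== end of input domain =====

-- B replaces A's stride-indexed range loop with repeated slicing by a single element-wise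
-- pass maintaining a running buffer flushed at size max_array_num (alternative decomposition, same cost).

-- ===== PORT A =====
def group_events (events : List String) (max_array_num : Int) : List String :=
  if max_array_num = 0 ∨ max_array_num ≤ 1 then events
  else
    (PySem.List.pyRange 0 (PySem.List.len events) max_array_num).foldl
      (fun grouped_events i =>
        let group := PySem.List.slice events (some i) (some (i + max_array_num))
        if 0 < PySem.List.len group then grouped_events ++ [PySem.Str.join "\n" group]
        else grouped_events) []

-- ===== PORT B =====
-- the element-wise loop of Source B: state = (remaining events, cur buffer, result)
def geAltLoop (m : Int) : List String → List String → List String → List String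
  | [], cur, result => if cur ≠ [] then result ++ [PySem.Str.join "\n" cur] else result
  | e :: rest, cur, result =>
    if PySem.List.len (cur ++ [e]) = m then
      geAltLoop m rest [] (result ++ [PySem.Str.join "\n" (cur ++ [e])])
    else geAltLoop m rest (cur ++ [e]) result

def group_events_alt (events : List String) (max_array_num : Int) : List String :=
  if max_array_num = 0 ∨ max_array_num ≤ 1 then events
  else geAltLoop max_array_num events [] []

-- ===== PRECONDITION & SPEC =====
def Spec_group_events (events : List String) (max_array_num : Int) (out : List String) : Prop := out = group_events_alt events max_array_num
instance (events : List String) (max_array_num : Int) (out : List String) : Decidable (Spec_group_events events max_array_num out) := by unfold Spec_group_events; infer_instance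

-- ===== CLAIM (what is proved, stated in full; the proofs are below) =====
def Claim_equal_group_events : Prop := ∀ (events : List String) (max_array_num : Int), Dom_group_events events max_array_num → Spec_group_events events max_array_num (group_events events max_array_num)

-- ===== LEMMAS AND PROOFS =====

-- common reference form: the list chunked into pieces of size k+1
def pvChunk (k : Nat) : List String → List (List String)
  | [] => []
  | x :: rest => (x :: rest.take k) :: pvChunk k (rest.drop k)
termination_by l => l.length
decreasing_by simp

lemma pvChunk_nil (k : Nat) : pvChunk k [] = [] := by rw [pvChunk.eq_def]

lemma pvChunk_cons (k : Nat) (x : String) (rest : List String) :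
    pvChunk k (x :: rest) = (x :: rest.take k) :: pvChunk k (rest.drop k) := by
  rw [pvChunk.eq_def]

lemma pyRange_pos_nil (a b s : Int) (hs : 0 < s) (h : b ≤ a) :
    PySem.List.pyRange a b s = [] := by
  rw [PySem.List.pyRange_of_pos _ _ hs, if_neg (by omega)]
  simp

lemma pyRange_pos_cons (a b s : Int) (hs : 0 < s) (hab : a < b) :
    PySem.List.pyRange a b s = a :: PySem.List.pyRange (a + s) b s := by
  rw [PySem.List.pyRange_of_pos _ _ hs, PySem.List.pyRange_of_pos _ _ hs, if_pos hab]
  have hc : ((b - a + s - 1) / s).toNat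
      = (if a + s < b then ((b - (a + s) + s - 1) / s).toNat else 0) + 1 := by
    by_cases h : a + s < b
    · have hnum : b - a + s - 1 = (b - (a + s) + s - 1) + 1 * s := by ring
      have hq : (b - a + s - 1) / s = (b - (a + s) + s - 1) / s + 1 := by
        rw [hnum, Int.add_mul_ediv_right _ _ (by omega : s ≠ 0)]
      have hq0 : 0 ≤ (b - (a + s) + s - 1) / s := Int.ediv_nonneg (by omega) (by omega)
      rw [if_pos h]; omega
    · have h1 : (1 : Int) ≤ (b - a + s - 1) / s := by
        rw [Int.le_ediv_iff_mul_le hs]; omega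
      have h2 : (b - a + s - 1) / s < 2 := by
        rw [Int.ediv_lt_iff_lt_mul hs]; omega
      rw [if_neg h]; omega
  rw [hc, List.range_succ_eq_map, List.map_cons, List.map_map]
  congr 1
  · simp
  · apply List.map_congr_left; intro x _
    simp only [Function.comp_def, Nat.succ_eq_add_one]
    push_cast; ring

lemma pyRange_shift (a b s : Int) (hs : 0 < s) :
    PySem.List.pyRange (a + s) b s = (PySem.List.pyRange a (b - s) s).map (· + s) := by
  rw [PySem.List.pyRange_of_pos _ _ hs, PySem.List.pyRange_of_pos _ _ hs, List.map_map]
  have hc : (if a + s < b then ((b - (a + s) + s - 1) / s).toNat else 0)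
      = (if a < b - s then ((b - s - a + s - 1) / s).toNat else 0) := by
    have : b - (a + s) + s - 1 = b - s - a + s - 1 := by ring
    rw [this]
    by_cases h : a + s < b
    · rw [if_pos h, if_pos (by omega)]
    · rw [if_neg h, if_neg (by omega)]
  rw [hc]
  apply List.map_congr_left; intro x _; simp; ring

lemma A_loop (k : Nat) (hk : 1 ≤ k) : ∀ (n : Nat) (l : List String), l.length = n → ∀ (acc : List String),
    (PySem.List.pyRange 0 (PySem.List.len l) ((k : Int) + 1)).foldl
      (fun grouped_events i =>
        let group := PySem.List.slice l (some i) (some (i + ((k : Int) + 1)))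
        if 0 < PySem.List.len group then grouped_events ++ [PySem.Str.join "\n" group]
        else grouped_events) acc
    = acc ++ (pvChunk k l).map (PySem.Str.join "\n") := by
  intro n
  induction n using Nat.strong_induction_on with
  | _ n ih =>
    intro l hl acc
    have hs : (0 : Int) < (k : Int) + 1 := by omega
    match l, hl with
    | [], hl =>
      rw [pvChunk_nil]
      simp [pyRange_pos_nil 0 0 _ hs le_rfl, PySem.List.len]
    | x :: rest, hl =>
      have hlen : PySem.List.len (x :: rest) = ((rest.length : Int) + 1) := by
        simp [PySem.List.len]
      have hcons : PySem.List.pyRange 0 (PySem.List.len (x :: rest)) ((k : Int) + 1)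
          = 0 :: PySem.List.pyRange (0 + ((k : Int) + 1)) (PySem.List.len (x :: rest)) ((k : Int) + 1) := by
        apply pyRange_pos_cons _ _ _ hs; rw [hlen]; omega
      rw [hcons, List.foldl_cons]
      -- head step: slice at 0
      have hslice0 : PySem.List.slice (x :: rest) (some 0) (some (0 + ((k : Int) + 1)))
          = x :: rest.take k := by
        rw [zero_add]
        rw [show ((k : Int) + 1) = ((k + 1 : Nat) : Int) by push_cast; ring]
        rw [PySem.List.slice_zero_start, PySem.List.slice_to_natCast]
        simp
      rw [hslice0]
      rw [if_pos (by simp [PySem.List.len])]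
      -- shift the remaining range onto the dropped list
      rw [pyRange_shift _ _ _ hs, List.foldl_map]
      have hdroplen : (rest.drop k).length = rest.length - k := by simp
      have hrange : PySem.List.pyRange 0 (PySem.List.len (x :: rest) - ((k : Int) + 1)) ((k : Int) + 1)
          = PySem.List.pyRange 0 (PySem.List.len (rest.drop k)) ((k : Int) + 1) := by
        by_cases h : k < rest.length
        · congr 1
          simp [PySem.List.len, hdroplen]
          omega
        · rw [pyRange_pos_nil _ _ _ hs (by rw [hlen]; omega),
              pyRange_pos_nil _ _ _ hs (by simp [PySem.List.len, hdroplen]; omega)]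
      rw [hrange]
      have hbody := PySem.List.foldl_congr_mem
        (PySem.List.pyRange 0 (PySem.List.len (rest.drop k)) ((k : Int) + 1))
        (fun grouped_events y =>
          let group := PySem.List.slice (x :: rest) (some (y + ((k : Int) + 1))) (some (y + ((k : Int) + 1) + ((k : Int) + 1)))
          if 0 < PySem.List.len group then grouped_events ++ [PySem.Str.join "\n" group]
          else grouped_events)
        (fun grouped_events i =>
          let group := PySem.List.slice (rest.drop k) (some i) (some (i + ((k : Int) + 1)))
          if 0 < PySem.List.len group then grouped_events ++ [PySem.Str.join "\n" group]
          else grouped_events)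
        (acc ++ [PySem.Str.join "\n" (x :: rest.take k)])
        (by
          intro a i hi
          have hi0 : 0 ≤ i := by
            rcases (PySem.List.mem_pyRange_iff_of_pos hs i).1 hi with ⟨h1, _, _⟩
            exact h1
          have e1 : PySem.List.slice (x :: rest) (some (i + ((k : Int) + 1)))
              (some (i + ((k : Int) + 1) + ((k : Int) + 1)))
              = ((x :: rest).drop (i + ((k : Int) + 1)).toNat).take
                ((i + ((k : Int) + 1) + ((k : Int) + 1)).toNat - (i + ((k : Int) + 1)).toNat) :=
            PySem.List.slice_toNat _ (by omega) (by omega)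
          have e2 : PySem.List.slice (rest.drop k) (some i) (some (i + ((k : Int) + 1)))
              = ((rest.drop k).drop i.toNat).take ((i + ((k : Int) + 1)).toNat - i.toNat) :=
            PySem.List.slice_toNat _ hi0 (by omega)
          simp only [e1, e2]
          have hd : ((x :: rest).drop (i + ((k : Int) + 1)).toNat)
              = ((rest.drop k).drop i.toNat) := by
            rw [List.drop_drop]
            rw [show (i + ((k : Int) + 1)).toNat = (k + i.toNat) + 1 by omega,
                List.drop_succ_cons]
          have ht : (i + ((k : Int) + 1) + ((k : Int) + 1)).toNat - (i + ((k : Int) + 1)).toNat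
              = (i + ((k : Int) + 1)).toNat - i.toNat := by omega
          rw [hd, ht])
      rw [hbody]
      rw [ih (rest.length - k) (by simp at hl; omega) (rest.drop k) hdroplen]
      rw [pvChunk_cons]
      simp

lemma B_loop (k : Nat) (_hk : 1 ≤ k) : ∀ (l cur acc : List String), cur.length < k + 1 →
    geAltLoop ((k : Int) + 1) l cur acc = acc ++ (pvChunk k (cur ++ l)).map (PySem.Str.join "\n") := by
  intro l
  induction l with
  | nil =>
    intro cur acc hcur
    rw [geAltLoop]
    match cur, hcur with
    | [], _ => simp [pvChunk_nil]
    | c :: cs, hcur =>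
      rw [if_pos (by simp)]
      have : pvChunk k ((c :: cs) ++ []) = [c :: cs] := by
        rw [List.append_nil, pvChunk_cons]
        have h1 : cs.take k = cs := List.take_of_length_le (by simp at hcur; omega)
        have h2 : cs.drop k = [] := List.drop_of_length_le (by simp at hcur; omega)
        rw [h1, h2, pvChunk_nil]
      rw [this]; simp
  | cons e rest ih =>
    intro cur acc hcur
    rw [geAltLoop]
    by_cases h : PySem.List.len (cur ++ [e]) = (k : Int) + 1
    · rw [if_pos h]
      rw [ih [] _ (by simp)]
      have hlen : (cur ++ [e]).length = k + 1 := by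
        simp [PySem.List.len] at h ⊢; omega
      have hchunk : pvChunk k (cur ++ e :: rest) = (cur ++ [e]) :: pvChunk k rest := by
        have hassoc : cur ++ e :: rest = (cur ++ [e]) ++ rest := by simp
        rw [hassoc]
        match hce : cur ++ [e], hlen with
        | y :: ys, hlen =>
          rw [List.cons_append, pvChunk_cons]
          have hy : ys.length = k := by simp at hlen; omega
          have h1 : (ys ++ rest).take k = ys := by
            rw [List.take_append_of_le_length (by omega), List.take_of_length_le (by omega)]
          have h2 : (ys ++ rest).drop k = rest := by
            rw [List.drop_append_of_le_length (by omega), List.drop_of_length_le (by omega)]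
            simp
          rw [h1, h2]
      rw [hchunk]
      simp
    · rw [if_neg h]
      have hlt : (cur ++ [e]).length < k + 1 := by
        simp [PySem.List.len] at h ⊢
        simp at hcur
        omega
      rw [ih (cur ++ [e]) acc hlt]
      have : (cur ++ [e]) ++ rest = cur ++ e :: rest := by simp
      rw [this]

-- ===== VERDICT (by name: the statement is the Claim_ definition above) =====
theorem group_events_spec : Claim_equal_group_events := by
  intro events m _hdom
  unfold Spec_group_events group_events group_events_alt
  by_cases hg : m = 0 ∨ m ≤ 1
  · rw [if_pos hg, if_pos hg]
  · rw [if_neg hg, if_neg hg]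
    obtain ⟨k, hk1, hkm⟩ : ∃ k : Nat, 1 ≤ k ∧ m = (k : Int) + 1 :=
      ⟨m.toNat - 1, by omega, by omega⟩
    subst hkm
    rw [A_loop k hk1 events.length events rfl [], B_loop k hk1 events [] [] (by simp)]
    simp
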